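-- pv_equiv track=rewrite | github.com/AbuMaha4/NeuralXpresso | notebooks/plots_functions.py | UpdateCBPalette
-- ===== SOURCE A (Python) =====
-- def UpdateCBPalette(emotion_colors):
--     """
--     Updates a color palette with the specified colors for each emotion.
--
--     Parameters:
--     - emotion_colors (dict): a dictionary mapping emotions to color codes (e.g. {'Neutral': '#CA3435', 'Happy': '#00ff00'})
--     - default_palette (list, optional): a list of color codes to use as the default palette.
--     If not specified, the default is ['#CA3435', '#ff7f00', '#9370DB', '#40E0D0', '#1f77b4', '#9467bd', '#7f7f7f'].
--
--     Returns:
--     - a modified color palette with the specified colors for each emotion.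
--     """
--     # Define the default color palette
--     default_palette = ['#CA3435', '#ff7f00', '#9370DB', '#40E0D0', '#1f77b4', '#9467bd', '#7f7f7f']
--
--     # Create a copy of the default palette to modify
--     new_palette = default_palette.copy()
--
--     # Update the color of each emotion in the new palette
--     for emotion, color in emotion_colors.items():
--         if emotion in ['Neutral', 'Happy', 'Sad', 'Angry', 'Surprise', 'Fear', 'Disgust']:
--             index = ['Neutral', 'Happy', 'Sad', 'Angry', 'Surprise', 'Fear', 'Disgust'].index(emotion)
--             new_palette[index] = color
--
--     return new_palette
-- ===== SOURCE B (Python) =====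
-- def UpdateCBPalette(emotion_colors):
--     # Gather: walk the seven fixed (emotion, default) slots and read the
--     # requested color from the input, falling back to the default on a miss.
--     emotions = ['Neutral', 'Happy', 'Sad', 'Angry', 'Surprise', 'Fear', 'Disgust']
--     defaults = ['#CA3435', '#ff7f00', '#9370DB', '#40E0D0', '#1f77b4', '#9467bd', '#7f7f7f']
--     return [emotion_colors.get(e, d) for e, d in zip(emotions, defaults)]
-- ===== Notes on version B (the rewrite author's own statement) =====
-- stated objective: simpler
-- what changed: Replaced A's scatter (copy the default palette, loop over the input dict's items and write into slots located with list.index) by a gather that loops over the seven fixed (emotion, default) slots and reads each color from the input with dict.get, never touching list.index or the copy-then-mutate palette.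
import Mathlib
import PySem

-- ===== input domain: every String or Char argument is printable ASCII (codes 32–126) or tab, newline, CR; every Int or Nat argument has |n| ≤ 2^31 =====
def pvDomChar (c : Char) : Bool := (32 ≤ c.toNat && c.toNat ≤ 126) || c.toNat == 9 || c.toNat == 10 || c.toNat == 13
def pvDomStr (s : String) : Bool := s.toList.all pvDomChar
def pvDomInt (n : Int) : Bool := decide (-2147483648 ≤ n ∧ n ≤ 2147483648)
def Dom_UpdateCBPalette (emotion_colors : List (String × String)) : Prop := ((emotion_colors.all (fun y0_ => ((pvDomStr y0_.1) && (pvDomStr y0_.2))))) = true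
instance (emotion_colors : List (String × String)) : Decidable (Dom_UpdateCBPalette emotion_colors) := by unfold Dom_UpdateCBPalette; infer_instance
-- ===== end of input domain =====

-- B replaces A's scatter loop over the input dict (list.index + in-place writes into a
-- copied palette) by a gather over the seven fixed (emotion, default) slots using dict.get;
-- objective: simpler.

-- ===== PORT A =====
-- the fixed emotion list A writes inline (twice) in its loop body
def pvEmotions : List String := ["Neutral", "Happy", "Sad", "Angry", "Surprise", "Fear", "Disgust"]

def pvDefaults : List String := ["#CA3435", "#ff7f00", "#9370DB", "#40E0D0", "#1f77b4", "#9467bd", "#7f7f7f"]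

-- one iteration of A's for-loop: membership test, then list.index and in-place write
-- (index? returns a valid index into the 7-slot palette, so List.set is exact here)
def pvStep (pal : List String) (kv : String × String) : List String :=
  if pvEmotions.contains kv.1 then
    match PySem.List.index? pvEmotions kv.1 with
    | some i => pal.set i kv.2
    | none => pal
  else pal

def UpdateCBPalette (emotion_colors : List (String × String)) : List String :=
  emotion_colors.foldl pvStep pvDefaults

-- ===== PORT B =====
-- dict.get(e, d) = first-match lookup in the association list, default on a miss
def UpdateCBPalette_alt (emotion_colors : List (String × String)) : List String :=
  (pvEmotions.zip pvDefaults).map (fun ed => (emotion_colors.lookup ed.1).getD ed.2)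

-- ===== PRECONDITION & SPEC =====
-- Pre_ excludes association lists with duplicate keys, which cannot arise from a Python dict:
-- there A's last-write-wins and B's first-match are equally accidental readings of the list.
def Pre_UpdateCBPalette (emotion_colors : List (String × String)) : Prop :=
  (emotion_colors.map Prod.fst).Nodup
instance (emotion_colors : List (String × String)) : Decidable (Pre_UpdateCBPalette emotion_colors) := by unfold Pre_UpdateCBPalette; infer_instance

def pvWitness_UpdateCBPalette : (List (String × String)) := [("Happy", "#00ff00"), ("Foo", "#123456")]

def Spec_UpdateCBPalette (emotion_colors : List (String × String)) (out : List String) : Prop := out = UpdateCBPalette_alt emotion_colors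
instance (emotion_colors : List (String × String)) (out : List String) : Decidable (Spec_UpdateCBPalette emotion_colors out) := by unfold Spec_UpdateCBPalette; infer_instance

-- ===== CLAIM (what is proved, stated in full; the proofs are below) =====
def Claim_equal_UpdateCBPalette : Prop := ∀ (emotion_colors : List (String × String)), Dom_UpdateCBPalette emotion_colors → Pre_UpdateCBPalette emotion_colors → Spec_UpdateCBPalette emotion_colors (UpdateCBPalette emotion_colors)

-- ===== LEMMAS AND PROOFS =====

-- a key absent from the key column is not found by first-match lookup
theorem pv_lookup_eq_none {l : List (String × String)} {k : String}
    (h : k ∉ l.map Prod.fst) : l.lookup k = none := by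
  induction l with
  | nil => rfl
  | cons p rest ih =>
    simp only [List.map_cons, List.mem_cons, not_or] at h
    simp [List.lookup, beq_eq_false_iff_ne.mpr h.1, ih h.2]

-- the loop invariant: running A's loop on any 7-slot palette gathers, slot by slot,
-- the first-match lookup with the current slot value as default
theorem pv_loop_eq (ecs : List (String × String)) (h : (ecs.map Prod.fst).Nodup) :
    ∀ a b c d e f g : String,
      ecs.foldl pvStep [a, b, c, d, e, f, g] =
        [(ecs.lookup "Neutral").getD a, (ecs.lookup "Happy").getD b,
         (ecs.lookup "Sad").getD c, (ecs.lookup "Angry").getD d,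
         (ecs.lookup "Surprise").getD e, (ecs.lookup "Fear").getD f,
         (ecs.lookup "Disgust").getD g] := by
  induction ecs with
  | nil => intro a b c d e f g; rfl
  | cons p rest ih =>
    obtain ⟨k, v⟩ := p
    simp only [List.map_cons, List.nodup_cons] at h
    obtain ⟨hk, hrest⟩ := h
    intro a b c d e f g
    have hnone : rest.lookup k = none := pv_lookup_eq_none hk
    by_cases h0 : k = "Neutral"
    · subst h0
      simpa [List.lookup, hnone, pvStep, pvEmotions, PySem.List.index?] using ih hrest v b c d e f g
    by_cases h1 : k = "Happy"
    · subst h1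
      simpa [List.lookup, hnone, h0, pvStep, pvEmotions, PySem.List.index?] using ih hrest a v c d e f g
    by_cases h2 : k = "Sad"
    · subst h2
      simpa [List.lookup, hnone, h0, h1, pvStep, pvEmotions, PySem.List.index?] using ih hrest a b v d e f g
    by_cases h3 : k = "Angry"
    · subst h3
      simpa [List.lookup, hnone, h0, h1, h2, pvStep, pvEmotions, PySem.List.index?] using ih hrest a b c v e f g
    by_cases h4 : k = "Surprise"
    · subst h4
      simpa [List.lookup, hnone, h0, h1, h2, h3, pvStep, pvEmotions, PySem.List.index?] using ih hrest a b c d v f g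
    by_cases h5 : k = "Fear"
    · subst h5
      simpa [List.lookup, hnone, h0, h1, h2, h3, h4, pvStep, pvEmotions, PySem.List.index?] using ih hrest a b c d e v g
    by_cases h6 : k = "Disgust"
    · subst h6
      simpa [List.lookup, hnone, h0, h1, h2, h3, h4, h5, pvStep, pvEmotions, PySem.List.index?] using ih hrest a b c d e f v
    · have e0 : ("Neutral" == k) = false := beq_eq_false_iff_ne.mpr (Ne.symm h0)
      have e1 : ("Happy" == k) = false := beq_eq_false_iff_ne.mpr (Ne.symm h1)
      have e2 : ("Sad" == k) = false := beq_eq_false_iff_ne.mpr (Ne.symm h2)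
      have e3 : ("Angry" == k) = false := beq_eq_false_iff_ne.mpr (Ne.symm h3)
      have e4 : ("Surprise" == k) = false := beq_eq_false_iff_ne.mpr (Ne.symm h4)
      have e5 : ("Fear" == k) = false := beq_eq_false_iff_ne.mpr (Ne.symm h5)
      have e6 : ("Disgust" == k) = false := beq_eq_false_iff_ne.mpr (Ne.symm h6)
      simpa [List.lookup, e0, e1, e2, e3, e4, e5, e6, h0, h1, h2, h3, h4, h5, h6,
        pvStep, pvEmotions] using ih hrest a b c d e f g

-- ===== VERDICT (by name: the statement is the Claim_ definition above) =====
theorem UpdateCBPalette_spec : Claim_equal_UpdateCBPalette := by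
  intro ecs _ hpre
  unfold Spec_UpdateCBPalette UpdateCBPalette UpdateCBPalette_alt pvDefaults
  exact pv_loop_eq ecs hpre _ _ _ _ _ _ _
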